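-- pv_equiv track=rewrite | github.com/Kiran9206/Python-Data-Structures | dsa_5.py | mm_subarray
-- ===== SOURCE A (Python) =====
-- def min_max(A):
--     Min = Max = A[0]
--     for item in A:
--         if Min > item:
--             Min = item
--         elif Max < item:
--             Max = item
--     return Min, Max
--
-- def mm_subarray(A):  #Brute force approach........  #Space complexity = O(1),    Time Complexity = O(N(2N)) ?? 2N+N^2 >>> O(N^2)
--     Min = min_max(A)[0]
--     Max = min_max(A)[1]
--     length = 10**9
--     for index, item in enumerate(A):
--         if item == Min:
--             for index_1 in range(index+1,len(A)):
--                 if A[index_1] == Max: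
--                     length = min(length,(index_1-index)+1)
--                     break
--         elif item == Max:
--              for index_1 in range(index+1,len(A)):
--                 if A[index_1] == Min:
--                     length = min(length,(index_1-index)+1)
--                     break
--     return length
-- ===== SOURCE B (Python) =====
-- def mm_subarray(A):
--     # single pass: track the last-seen index of the min and of the max
--     mn = min(A)
--     mx = max(A)
--     length = 10**9
--     last_min = last_max = None
--     for k, item in enumerate(A):
--         if item == mn and last_max is not None:
--             length = min(length, k - last_max + 1)
--         if item == mx and last_min is not None:
--             length = min(length, k - last_min + 1)
--         if item == mn:
--             last_min = k
--         if item == mx: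
--             last_max = k
--     return length
-- ===== Notes on version B (the rewrite author's own statement) =====
-- stated objective: alternative
-- what changed: replaced the nested forward scan for the first matching extremum after each position by a single pass that tracks the last-seen index of the min and of the max and updates the best window length at each element
import Mathlib
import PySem

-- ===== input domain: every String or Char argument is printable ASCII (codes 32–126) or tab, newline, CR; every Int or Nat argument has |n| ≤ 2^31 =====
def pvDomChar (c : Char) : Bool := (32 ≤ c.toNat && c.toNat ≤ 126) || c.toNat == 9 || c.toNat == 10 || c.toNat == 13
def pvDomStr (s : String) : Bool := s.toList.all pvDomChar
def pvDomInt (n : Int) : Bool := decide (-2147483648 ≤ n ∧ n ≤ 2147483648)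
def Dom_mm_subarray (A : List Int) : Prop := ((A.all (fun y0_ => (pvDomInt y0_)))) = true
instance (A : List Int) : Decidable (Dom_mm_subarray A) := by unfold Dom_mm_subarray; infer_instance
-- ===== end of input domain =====

-- B replaces A's nested forward scans by a single pass tracking the last-seen
-- index of the min and of the max; equal on every nonempty list.


-- ===== PORT A =====
-- min_max: running min/max loop (A[0] raises on []; headD 0 is only reached outside Pre_)
def min_max (A : List Int) : Int × Int :=
  A.foldl (fun mm item =>
    if mm.1 > item then (item, mm.2)
    else if mm.2 < item then (mm.1, item)
    else mm) (A.headD 0, A.headD 0)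

-- the inner `for index_1 in range(index+1, len(A)): if A[index_1] == t: …; break` loop:
-- first index ≥ j holding t
def firstIdxFrom (A : List Int) (t : Int) (j : Nat) : Option Nat :=
  if h : j < A.length then
    if A[j] = t then some j else firstIdxFrom A t (j + 1)
  else none
termination_by A.length - j

def mm_subarray (A : List Int) : Int :=
  let mn := (min_max A).1
  let mx := (min_max A).2
  (PySem.List.enumerate A 0).foldl (fun length p =>
    if p.2 = mn then
      match firstIdxFrom A mx (p.1.toNat + 1) with
      | some j => min length (((j : Int) - p.1) + 1)
      | none => length
    else if p.2 = mx then
      match firstIdxFrom A mn (p.1.toNat + 1) with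
      | some j => min length (((j : Int) - p.1) + 1)
      | none => length
    else length) (10 ^ 9)

-- ===== PORT B =====
-- loop body of Source B's single pass; state = (best length, last min index, last max index)
def stepB (mn mx : Int) (s : Int × Option Int × Option Int) (p : Int × Int) :
    Int × Option Int × Option Int :=
  let len := if p.2 = mn then
      (match s.2.2 with | some m => min s.1 (p.1 - m + 1) | none => s.1) else s.1
  let len := if p.2 = mx then
      (match s.2.1 with | some m => min len (p.1 - m + 1) | none => len) else len
  let lm := if p.2 = mn then some p.1 else s.2.1
  let lM := if p.2 = mx then some p.1 else s.2.2
  (len, lm, lM)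

def mm_subarray_alt (A : List Int) : Int :=
  match PySem.List.min? A (fun y => y), PySem.List.max? A (fun y => y) with
  | some mn, some mx =>
      ((PySem.List.enumerate A 0).foldl (stepB mn mx) ((10 ^ 9 : Int), none, none)).1
  | _, _ => 0   -- min()/max() raise on []; outside Pre_

-- ===== PRECONDITION & SPEC =====
-- A raises IndexError on [] (A[0]); B raises ValueError there (min([])); excluded.
def Pre_mm_subarray (A : List Int) : Prop := A ≠ []
instance (A : List Int) : Decidable (Pre_mm_subarray A) := by unfold Pre_mm_subarray; infer_instance
def pvWitness_mm_subarray : List Int := [1, 3, 2]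

def Spec_mm_subarray (A : List Int) (out : Int) : Prop := out = mm_subarray_alt A
instance (A : List Int) (out : Int) : Decidable (Spec_mm_subarray A out) := by unfold Spec_mm_subarray; infer_instance

-- ===== CLAIM (what is proved, stated in full; the proofs are below) =====
def Claim_equal_mm_subarray : Prop := ∀ (A : List Int), Dom_mm_subarray A → Pre_mm_subarray A → Spec_mm_subarray A (mm_subarray A)

-- ===== LEMMAS AND PROOFS =====

-- A's min_max computes the running min and max
theorem minmax_fold (t : List Int) : ∀ (a b : Int), a ≤ b →
    t.foldl (fun mm item =>
      if mm.1 > item then (item, mm.2)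
      else if mm.2 < item then (mm.1, item)
      else mm) (a, b) = (t.foldl min a, t.foldl max b) := by
  induction t with
  | nil => intro a b _; rfl
  | cons x t ih =>
      intro a b hab
      simp only [List.foldl_cons]
      by_cases h1 : a > x
      · simp only [h1, if_pos]
        rw [ih x b (by omega)]
        congr 1
        · congr 1; omega
        · congr 1; omega
      · simp only [h1, if_neg, if_false]
        by_cases h2 : b < x
        · simp only [h2, if_pos]
          rw [ih a x (by omega)]
          congr 1
          · congr 1; omega
          · congr 1; omega
        · simp only [h2, if_neg, if_false]
          rw [ih a b hab]
          congr 1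
          · congr 1; omega
          · congr 1; omega

theorem min_max_eq (x : Int) (t : List Int) :
    min_max (x :: t) = (t.foldl min x, t.foldl max x) := by
  unfold min_max
  simp only [List.headD_cons, List.foldl_cons]
  have h0 : (if (x, x).1 > x then (x, (x,x).2) else if (x,x).2 < x then ((x,x).1, x) else (x,x)) = (x, x) := by
    simp
  rw [h0, minmax_fold t x x le_rfl]

-- candidate produced by A's loop body at one enumerate entry
def candA (A : List Int) (mn mx : Int) (p : Int × Int) : Option Int :=
  if p.2 = mn then (firstIdxFrom A mx (p.1.toNat + 1)).map (fun j => ((j : Int) - p.1) + 1)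
  else if p.2 = mx then (firstIdxFrom A mn (p.1.toNat + 1)).map (fun j => ((j : Int) - p.1) + 1)
  else none

def ominStep (g : Int × Int → Option Int) (acc : Int) (x : Int × Int) : Int :=
  match g x with | some c => min acc c | none => acc

theorem stepA_eq (A : List Int) (mn mx : Int) :
    (fun (length : Int) (p : Int × Int) =>
      if p.2 = mn then
        match firstIdxFrom A mx (p.1.toNat + 1) with
        | some j => min length (((j : Int) - p.1) + 1)
        | none => length
      else if p.2 = mx then
        match firstIdxFrom A mn (p.1.toNat + 1) with
        | some j => min length (((j : Int) - p.1) + 1)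
        | none => length
      else length) = ominStep (candA A mn mx) := by
  funext acc p
  unfold ominStep candA
  split_ifs <;> rcases h : firstIdxFrom A mx (p.1.toNat + 1) with _ | j <;>
    rcases h' : firstIdxFrom A mn (p.1.toNat + 1) with _ | j' <;> simp [h, h']

theorem foldl_omin_le_init (g : Int × Int → Option Int) :
    ∀ (l : List (Int × Int)) (acc : Int), l.foldl (ominStep g) acc ≤ acc := by
  intro l
  induction l with
  | nil => intro acc; simp
  | cons x t ih =>
      intro acc
      simp only [List.foldl_cons]
      refine le_trans (ih _) ?_
      unfold ominStep
      rcases g x with _ | c <;> simp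

theorem foldl_omin_le_cand (g : Int × Int → Option Int) :
    ∀ (l : List (Int × Int)) (acc : Int) (x : Int × Int) (c : Int),
      x ∈ l → g x = some c → l.foldl (ominStep g) acc ≤ c := by
  intro l
  induction l with
  | nil => intro _ _ _ h; exact absurd h (List.not_mem_nil)
  | cons y t ih =>
      intro acc x c hx hg
      simp only [List.foldl_cons]
      rcases List.mem_cons.mp hx with rfl | hx'
      · refine le_trans (foldl_omin_le_init g t _) ?_
        unfold ominStep; rw [hg]; exact min_le_right _ _
      · exact ih _ x c hx' hg

theorem foldl_omin_cases (g : Int × Int → Option Int) :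
    ∀ (l : List (Int × Int)) (acc : Int),
      l.foldl (ominStep g) acc = acc ∨
      ∃ x ∈ l, ∃ c, g x = some c ∧ l.foldl (ominStep g) acc = c := by
  intro l
  induction l with
  | nil => intro acc; left; rfl
  | cons y t ih =>
      intro acc
      simp only [List.foldl_cons]
      rcases ih (ominStep g acc y) with h | ⟨x, hx, c, hg, hr⟩
      · rw [h]
        unfold ominStep
        rcases hgy : g y with _ | c
        · left; rfl
        · rcases le_total acc c with hle | hge
          · left; simp [min_eq_left hle]
          · right; exact ⟨y, List.mem_cons_self, c, hgy, by simp [min_eq_right hge]⟩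
      · right; exact ⟨x, List.mem_cons_of_mem _ hx, c, hg, hr⟩

-- firstIdxFrom: soundness
theorem firstIdxFrom_sound (A : List Int) (t : Int) :
    ∀ (s j : Nat), firstIdxFrom A t s = some j →
      s ≤ j ∧ ∃ h : j < A.length, A[j] = t := by
  intro s
  induction s using firstIdxFrom.induct A t with
  | case1 s h ht =>
      intro j hj
      unfold firstIdxFrom at hj
      simp only [h, dif_pos, ht, if_pos] at hj
      cases hj
      exact ⟨le_rfl, h, ht⟩
  | case2 s h ht ih =>
      intro j hj
      unfold firstIdxFrom at hj
      simp only [h, dif_pos, ht, if_neg, if_false] at hj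
      obtain ⟨h1, h2⟩ := ih j hj
      exact ⟨by omega, h2⟩
  | case3 s h =>
      intro j hj
      unfold firstIdxFrom at hj
      simp [h] at hj

-- firstIdxFrom: completeness (finds one at or before any witness)
theorem firstIdxFrom_complete (A : List Int) (t : Int) :
    ∀ (s j : Nat), s ≤ j → (h : j < A.length) → A[j] = t →
      ∃ j', firstIdxFrom A t s = some j' ∧ j' ≤ j := by
  intro s
  induction s using firstIdxFrom.induct A t with
  | case1 s h ht =>
      intro j hsj hj hjt
      exact ⟨s, by unfold firstIdxFrom; simp [h, ht], hsj⟩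
  | case2 s h ht ih =>
      intro j hsj hj hjt
      have hne : s ≠ j := by rintro rfl; exact ht hjt
      obtain ⟨j', hj', hle⟩ := ih j (by omega) hj hjt
      refine ⟨j', ?_, hle⟩
      unfold firstIdxFrom
      simp [h, ht, hj']
  | case3 s h =>
      intro j hsj hj hjt
      omega

-- B's fold: upper bounds (init, last-index candidates, and all min/max pairs)
theorem B_le (mn mx : Int) :
    ∀ (l : List Int) (n0 : Int) (acc : Int) (lm lM : Option Int),
      (∀ m, lm = some m → m ≤ n0) → (∀ m, lM = some m → m ≤ n0) →
      (((PySem.List.enumerate l n0).foldl (stepB mn mx) (acc, lm, lM)).1 ≤ acc)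
      ∧ (∀ m, lM = some m → ∀ q, (hq : q < l.length) → l[q] = mn →
          ((PySem.List.enumerate l n0).foldl (stepB mn mx) (acc, lm, lM)).1 ≤ (n0 + q) - m + 1)
      ∧ (∀ m, lm = some m → ∀ q, (hq : q < l.length) → l[q] = mx →
          ((PySem.List.enumerate l n0).foldl (stepB mn mx) (acc, lm, lM)).1 ≤ (n0 + q) - m + 1)
      ∧ (∀ p q, (hq : q < l.length) → (hp : p < q) →
          ((l[p]'(by omega) = mx ∧ l[q] = mn) ∨ (l[p]'(by omega) = mn ∧ l[q] = mx)) →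
          ((PySem.List.enumerate l n0).foldl (stepB mn mx) (acc, lm, lM)).1 ≤ ((q : Int) - p) + 1) := by
  intro l
  induction l with
  | nil =>
      intro n0 acc lm lM _ _
      refine ⟨le_rfl, ?_, ?_, ?_⟩
      · intro _ _ q hq; simp at hq
      · intro _ _ q hq; simp at hq
      · intro p q hq; simp at hq
  | cons x t ih =>
      intro n0 acc lm lM hlm hlM
      rw [PySem.List.enumerate_cons, List.foldl_cons]
      rcases hstep : stepB mn mx (acc, lm, lM) (n0, x) with ⟨acc', lm', lM'⟩
      have hacc' : acc' ≤ acc ∧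
          (∀ m, lM = some m → x = mn → acc' ≤ n0 - m + 1) ∧
          (∀ m, lm = some m → x = mx → acc' ≤ n0 - m + 1) := by
        unfold stepB at hstep
        simp only [Prod.mk.injEq] at hstep
        obtain ⟨hA, _, _⟩ := hstep
        refine ⟨?_, ?_, ?_⟩
        · subst hA
          split_ifs <;> rcases lM with _ | m <;> rcases lm with _ | m' <;>
            simp <;> omega
        · rintro m rfl rfl
          subst hA
          simp only [if_pos rfl]
          split_ifs <;> rcases lm with _ | m' <;> simp <;> omega
        · rintro m rfl hxmx
          subst hA
          simp only [hxmx, if_pos rfl]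
          split_ifs <;> rcases lM with _ | m'' <;> simp <;> omega
      have hlm' : ∀ m, lm' = some m → m ≤ n0 + 1 := by
        unfold stepB at hstep
        simp only [Prod.mk.injEq] at hstep
        obtain ⟨_, hB, _⟩ := hstep
        intro m hm; subst hB
        split_ifs at hm
        · cases hm; omega
        · have := hlm m hm; omega
      have hlM' : ∀ m, lM' = some m → m ≤ n0 + 1 := by
        unfold stepB at hstep
        simp only [Prod.mk.injEq] at hstep
        obtain ⟨_, _, hC⟩ := hstep
        intro m hm; subst hC
        split_ifs at hm
        · cases hm; omega
        · have := hlM m hm; omega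
      obtain ⟨ih1, ih2, ih3, ih4⟩ := ih (n0 + 1) acc' lm' lM' hlm' hlM'
      have hlmval : x = mn → lm' = some n0 := by
        intro hx
        unfold stepB at hstep
        simp only [Prod.mk.injEq] at hstep
        rw [← hstep.2.1, hx, if_pos rfl]
      have hlMval : x = mx → lM' = some n0 := by
        intro hx
        unfold stepB at hstep
        simp only [Prod.mk.injEq] at hstep
        rw [← hstep.2.2, hx, if_pos rfl]
      have hlmkeep : x ≠ mn → lm' = lm := by
        intro hx
        unfold stepB at hstep
        simp only [Prod.mk.injEq] at hstep
        rw [← hstep.2.1, if_neg hx]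
      have hlMkeep : x ≠ mx → lM' = lM := by
        intro hx
        unfold stepB at hstep
        simp only [Prod.mk.injEq] at hstep
        rw [← hstep.2.2, if_neg hx]
      refine ⟨le_trans ih1 hacc'.1, ?_, ?_, ?_⟩
      · -- lM candidates
        intro m hm q hq hqv
        rcases q with _ | q
        · -- head is mn; candidate folded into acc'
          simp only [List.getElem_cons_zero] at hqv
          have := hacc'.2.1 m hm hqv
          refine le_trans ih1 (by omega)
        · simp only [List.getElem_cons_succ] at hqv
          by_cases hx : x = mx
          · have h2 := ih2 n0 (hlMval hx) q (by simpa using Nat.lt_of_succ_lt_succ hq) hqv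
            have hmn0 := hlM m hm
            refine le_trans h2 (by push_cast; omega)
          · have h2 := ih2 m (by rw [hlMkeep hx]; exact hm) q (by simpa using Nat.lt_of_succ_lt_succ hq) hqv
            refine le_trans h2 (by push_cast; omega)
      · -- lm candidates
        intro m hm q hq hqv
        rcases q with _ | q
        · simp only [List.getElem_cons_zero] at hqv
          have := hacc'.2.2 m hm hqv
          refine le_trans ih1 (by omega)
        · simp only [List.getElem_cons_succ] at hqv
          by_cases hx : x = mn
          · have h3 := ih3 n0 (hlmval hx) q (by simpa using Nat.lt_of_succ_lt_succ hq) hqv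
            have hmn0 := hlm m hm
            refine le_trans h3 (by push_cast; omega)
          · have h3 := ih3 m (by rw [hlmkeep hx]; exact hm) q (by simpa using Nat.lt_of_succ_lt_succ hq) hqv
            refine le_trans h3 (by push_cast; omega)
      · -- pairs
        intro p q hq hp hpair
        rcases p with _ | p
        · rcases q with _ | q
          · omega
          · simp only [List.getElem_cons_zero, List.getElem_cons_succ] at hpair
            rcases hpair with ⟨hx, hqv⟩ | ⟨hx, hqv⟩
            · have h2 := ih2 n0 (hlMval hx) q (by simpa using Nat.lt_of_succ_lt_succ hq) hqv
              refine le_trans h2 (by push_cast; omega)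
            · have h3 := ih3 n0 (hlmval hx) q (by simpa using Nat.lt_of_succ_lt_succ hq) hqv
              refine le_trans h3 (by push_cast; omega)
        · rcases q with _ | q
          · omega
          · simp only [List.getElem_cons_succ] at hpair
            have h4 := ih4 p q (by simpa using Nat.lt_of_succ_lt_succ hq) (by omega) hpair
            refine le_trans h4 (by push_cast; omega)

-- B's fold: the result is the initial value or some realised candidate
theorem B_cases (mn mx : Int) :
    ∀ (l : List Int) (n0 : Int) (acc : Int) (lm lM : Option Int),
      (((PySem.List.enumerate l n0).foldl (stepB mn mx) (acc, lm, lM)).1 = acc)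
      ∨ (∃ m q, ∃ hq : q < l.length, lM = some m ∧ l[q] = mn ∧
          ((PySem.List.enumerate l n0).foldl (stepB mn mx) (acc, lm, lM)).1 = (n0 + q) - m + 1)
      ∨ (∃ m q, ∃ hq : q < l.length, lm = some m ∧ l[q] = mx ∧
          ((PySem.List.enumerate l n0).foldl (stepB mn mx) (acc, lm, lM)).1 = (n0 + q) - m + 1)
      ∨ (∃ p q, ∃ hq : q < l.length, ∃ hp : p < q,
          ((l[p]'(by omega) = mx ∧ l[q] = mn) ∨ (l[p]'(by omega) = mn ∧ l[q] = mx)) ∧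
          ((PySem.List.enumerate l n0).foldl (stepB mn mx) (acc, lm, lM)).1 = ((q : Int) - p) + 1) := by
  intro l
  induction l with
  | nil => intro n0 acc lm lM; left; rfl
  | cons x t ih =>
      intro n0 acc lm lM
      rw [PySem.List.enumerate_cons, List.foldl_cons]
      rcases hstep : stepB mn mx (acc, lm, lM) (n0, x) with ⟨acc', lm', lM'⟩
      unfold stepB at hstep
      simp only [Prod.mk.injEq] at hstep
      obtain ⟨hA, hB, hC⟩ := hstep
      -- acc' is acc or a head candidate
      have hacc' : acc' = acc
          ∨ (∃ m, lM = some m ∧ x = mn ∧ acc' = n0 - m + 1)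
          ∨ (∃ m, lm = some m ∧ x = mx ∧ acc' = n0 - m + 1) := by
        subst hA
        by_cases h1 : x = mn <;> by_cases h2 : x = mx <;>
          rcases lM with _ | m <;> rcases lm with _ | m' <;>
          simp [h1, h2, min_def] <;>
            first | omega | tauto | (split_ifs <;> first | omega | tauto)
      rcases ih (n0 + 1) acc' lm' lM' with hr | ⟨m, q, hq, hm, hqv, hr⟩ | ⟨m, q, hq, hm, hqv, hr⟩ | ⟨p, q, hq, hp, hpair, hr⟩
      · -- result = acc' : translate head-candidate cases
        rcases hacc' with h | ⟨m, hm, hx, h⟩ | ⟨m, hm, hx, h⟩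
        · left; omega
        · right; left
          exact ⟨m, 0, by simp, hm, by simpa using hx, by push_cast; omega⟩
        · right; right; left
          exact ⟨m, 0, by simp, hm, by simpa using hx, by push_cast; omega⟩
      · -- candidate from lM'
        by_cases hx : x = mx
        · have : lM' = some n0 := by rw [← hC, hx, if_pos rfl]
          rw [this] at hm; cases hm
          right; right; right
          refine ⟨0, q + 1, by simpa using Nat.succ_lt_succ hq, Nat.succ_pos q, ?_, ?_⟩
          · left; exact ⟨by simpa using hx, by simpa using hqv⟩
          · push_cast; omega
        · have : lM' = lM := by rw [← hC, if_neg hx]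
          rw [this] at hm
          right; left
          exact ⟨m, q + 1, by simpa using Nat.succ_lt_succ hq, hm, by simpa using hqv, by push_cast; push_cast at hr; omega⟩
      · by_cases hx : x = mn
        · have : lm' = some n0 := by rw [← hB, hx, if_pos rfl]
          rw [this] at hm; cases hm
          right; right; right
          refine ⟨0, q + 1, by simpa using Nat.succ_lt_succ hq, Nat.succ_pos q, ?_, ?_⟩
          · right; exact ⟨by simpa using hx, by simpa using hqv⟩
          · push_cast; omega
        · have : lm' = lm := by rw [← hB, if_neg hx]
          rw [this] at hm
          right; right; left
          exact ⟨m, q + 1, by simpa using Nat.succ_lt_succ hq, hm, by simpa using hqv, by push_cast; push_cast at hr; omega⟩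
      · right; right; right
        refine ⟨p + 1, q + 1, by simpa using Nat.succ_lt_succ hq, by omega, ?_, by push_cast; push_cast at hr; omega⟩
        simpa using hpair

-- A's fold ≤ every min/max pair length
theorem A_pair_le (A : List Int) (mn mx : Int) (acc : Int)
    (p q : Nat) (hq : q < A.length) (hp : p < q)
    (hpair : (A[p]'(by omega) = mx ∧ A[q] = mn) ∨ (A[p]'(by omega) = mn ∧ A[q] = mx)) :
    (PySem.List.enumerate A 0).foldl (ominStep (candA A mn mx)) acc ≤ ((q : Int) - p) + 1 := by
  have hpA : p < A.length := by omega
  have hmem : ((0 : Int) + p, A[p]'hpA) ∈ PySem.List.enumerate A 0 :=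
    (PySem.List.mem_enumerate_iff A 0 _).mpr ⟨p, hpA, rfl⟩
  by_cases hmn : A[p]'hpA = mn
  · -- first branch: look for mx after p
    have hx : ∃ j, ∃ hj : j < A.length, p + 1 ≤ j ∧ j ≤ q ∧ A[j] = mx := by
      rcases hpair with ⟨hpv, hqv⟩ | ⟨hpv, hqv⟩
      · -- A[p] = mx and = mn, so mn = mx; A[q] = mn = mx
        exact ⟨q, hq, by omega, le_rfl, by rw [hqv, ← hmn, hpv]⟩
      · exact ⟨q, hq, by omega, le_rfl, hqv⟩
    obtain ⟨j, hj, hj1, hj2, hjv⟩ := hx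
    obtain ⟨j', hfind, hle⟩ := firstIdxFrom_complete A mx (p + 1) j hj1 hj hjv
    have hcand : candA A mn mx ((0 : Int) + p, A[p]'hpA) = some (((j' : Int) - ((0:Int) + p)) + 1) := by
      unfold candA
      rw [if_pos (show ((0:Int) + p, A[p]'hpA).2 = mn from hmn)]
      have h5 : (((0 : Int) + p, A[p]'hpA).1.toNat + 1) = p + 1 := by simp
      rw [h5, hfind]
      rfl
    refine le_trans (foldl_omin_le_cand _ _ acc _ _ hmem hcand) ?_
    have hs := firstIdxFrom_sound A mx (p + 1) j' hfind
    push_cast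
    omega
  · -- A[p] ≠ mn: pair must be (mn at p? no) → A[p] = mx, A[q] = mn
    have hpv : A[p]'hpA = mx := by
      rcases hpair with ⟨hpv, _⟩ | ⟨hpv, _⟩
      · exact hpv
      · exact absurd hpv hmn
    have hqv : A[q] = mn := by
      rcases hpair with ⟨_, hqv⟩ | ⟨hpv', _⟩
      · exact hqv
      · exact absurd hpv' hmn
    obtain ⟨j', hfind, hle⟩ := firstIdxFrom_complete A mn (p + 1) q (by omega) hq hqv
    have hcand : candA A mn mx ((0 : Int) + p, A[p]'hpA) = some (((j' : Int) - ((0:Int) + p)) + 1) := by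
      unfold candA
      rw [if_neg (show ¬((0:Int) + p, A[p]'hpA).2 = mn from hmn),
          if_pos (show ((0:Int) + p, A[p]'hpA).2 = mx from hpv)]
      have h5 : (((0 : Int) + p, A[p]'hpA).1.toNat + 1) = p + 1 := by simp
      rw [h5, hfind]
      rfl
    refine le_trans (foldl_omin_le_cand _ _ acc _ _ hmem hcand) ?_
    have hs := firstIdxFrom_sound A mn (p + 1) j' hfind
    push_cast
    omega

-- every realised A-candidate is a min/max pair length
theorem A_cand_pair (A : List Int) (mn mx : Int) (x : Int × Int) (c : Int)
    (hmem : x ∈ PySem.List.enumerate A 0) (hc : candA A mn mx x = some c) :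
    ∃ p q, ∃ hq : q < A.length, ∃ hp : p < q,
      ((A[p]'(by omega) = mx ∧ A[q] = mn) ∨ (A[p]'(by omega) = mn ∧ A[q] = mx)) ∧
      c = ((q : Int) - p) + 1 := by
  obtain ⟨k, hk, rfl⟩ := (PySem.List.mem_enumerate_iff A 0 x).mp hmem
  unfold candA at hc
  by_cases hmn : A[k] = mn
  · rw [if_pos (show ((0:Int) + k, A[k]).2 = mn from hmn)] at hc
    rcases hfind : firstIdxFrom A mx (((0 : Int) + k).toNat + 1) with _ | j
    · rw [hfind] at hc; cases hc
    · rw [hfind] at hc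
      simp only [Option.map_some] at hc
      obtain ⟨hsle, hjlt, hjv⟩ := firstIdxFrom_sound A mx _ j hfind
      refine ⟨k, j, hjlt, by omega, Or.inr ⟨by simpa using hmn, hjv⟩, ?_⟩
      cases hc; push_cast; omega
  · rw [if_neg (show ¬((0:Int) + k, A[k]).2 = mn from hmn)] at hc
    by_cases hmx : A[k] = mx
    · rw [if_pos (show ((0:Int) + k, A[k]).2 = mx from hmx)] at hc
      rcases hfind : firstIdxFrom A mn (((0 : Int) + k).toNat + 1) with _ | j
      · rw [hfind] at hc; cases hc
      · rw [hfind] at hc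
        simp only [Option.map_some] at hc
        obtain ⟨hsle, hjlt, hjv⟩ := firstIdxFrom_sound A mn _ j hfind
        refine ⟨k, j, hjlt, by omega, Or.inl ⟨by simpa using hmx, hjv⟩, ?_⟩
        cases hc; push_cast; omega
    · rw [if_neg (show ¬((0:Int) + k, A[k]).2 = mx from hmx)] at hc
      cases hc

-- the two folds agree (the heart of the proof)
theorem folds_eq (A : List Int) (mn mx : Int) :
    (PySem.List.enumerate A 0).foldl (ominStep (candA A mn mx)) (10 ^ 9) =
    ((PySem.List.enumerate A 0).foldl (stepB mn mx) ((10 ^ 9 : Int), none, none)).1 := by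
  obtain ⟨hB1, _, _, hB4⟩ := B_le mn mx A 0 (10 ^ 9) none none (by simp) (by simp)
  apply le_antisymm
  · -- ρA ≤ ρB via B_cases
    rcases B_cases mn mx A 0 (10 ^ 9) none none with hr | ⟨m, q, hq, hm, _, _⟩ | ⟨m, q, hq, hm, _, _⟩ | ⟨p, q, hq, hp, hpair, hr⟩
    · rw [hr]; exact foldl_omin_le_init _ _ _
    · cases hm
    · cases hm
    · rw [hr]; exact A_pair_le A mn mx _ p q hq hp hpair
  · -- ρB ≤ ρA via foldl_omin_cases
    rcases foldl_omin_cases (candA A mn mx) (PySem.List.enumerate A 0) (10 ^ 9) with hr | ⟨x, hx, c, hg, hr⟩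
    · rw [hr]; exact hB1
    · obtain ⟨p, q, hq, hp, hpair, hceq⟩ := A_cand_pair A mn mx x c hx hg
      rw [hr, hceq]
      exact hB4 p q hq hp hpair

-- ===== VERDICT (by name: the statement is the Claim_ definition above) =====
theorem mm_subarray_spec : Claim_equal_mm_subarray := by
  intro A _ hpre
  rcases A with _ | ⟨x, t⟩
  · exact absurd rfl hpre
  unfold Spec_mm_subarray mm_subarray mm_subarray_alt
  rw [PySem.List.min?_id_cons, PySem.List.max?_id_cons, min_max_eq]
  simp only []
  rw [stepA_eq (x :: t) (t.foldl min x) (t.foldl max x)]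
  exact folds_eq (x :: t) (t.foldl min x) (t.foldl max x)
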